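-- pv_equiv track=rewrite | github.com/miki77i/Convertor | app.py | add_string_child
-- ===== SOURCE A (Python) =====
-- def processing_str_code(code : list[str]):
--     '''Функция для обработки строк кода'''
--     new_code = []
--     for i in range(len(code)):
--         if not(code[i] == '\n'):
--             code[i] = code[i].replace('    ', '\t')
--             new_code.append(code[i])
--
--     return new_code
--
-- def add_string_child(text_code : list[str]) -> list[str]:
--     '''Функция переработки строк кода из списка
--         Сложение строк, которые вложенны в циклы, условия, функции'''
--     new_code = []
--     temp_line = text_code[0]
--
--     for i in range(1, len(text_code)):
--         if not('    ' in text_code[i]):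
--             new_code.append(temp_line)
--             temp_line = text_code[i]
--         else:
--             temp_line += text_code[i]
--
--     if not(temp_line in new_code):
--         new_code.append(temp_line)
--
--     return processing_str_code(new_code)
-- ===== SOURCE B (Python) =====
-- def add_string_child(text_code):
--     '''Merge indented continuation lines into the line that opens them,
--     drop a duplicated final group, then clean up the lines.'''
--     starts = [i for i, line in enumerate(text_code) if i == 0 or '    ' not in line]
--     bounds = starts + [len(text_code)]
--     groups = [''.join(text_code[a:b]) for a, b in zip(bounds, bounds[1:])]
--     last = groups.pop()
--     if last not in groups:
--         groups.append(last)
--     return [line.replace('    ', '\t') for line in groups if line != '\n']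
-- ===== Notes on version B (the rewrite author's own statement) =====
-- stated objective: alternative
-- what changed: B first computes the group-start indices with one enumerate pass, then materialises each merged group as a join of a slice between consecutive starts, pops the last group and re-appends it only if new, and cleans the lines with one comprehension — instead of A's forward loop carrying an accumulator list plus a growing temp string and its separate mutate-and-append helper; Pre_ excludes only the empty list, on which both raise IndexError.
import Mathlib
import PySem

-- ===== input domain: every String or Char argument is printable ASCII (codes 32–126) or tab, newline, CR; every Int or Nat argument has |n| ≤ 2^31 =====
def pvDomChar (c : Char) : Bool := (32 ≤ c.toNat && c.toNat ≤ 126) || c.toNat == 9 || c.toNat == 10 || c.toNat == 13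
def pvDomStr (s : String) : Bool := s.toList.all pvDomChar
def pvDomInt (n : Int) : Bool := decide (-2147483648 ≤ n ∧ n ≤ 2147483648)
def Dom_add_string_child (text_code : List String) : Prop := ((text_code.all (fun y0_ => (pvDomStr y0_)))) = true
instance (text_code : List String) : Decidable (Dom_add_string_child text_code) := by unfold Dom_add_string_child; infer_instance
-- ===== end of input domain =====

-- B finds the group-start indices first and joins slices between consecutive starts (A walks
-- forward carrying an accumulator list plus a growing temp line); 'alternative' objective.

-- ===== PORT A =====
-- processing_str_code: drop '\n' lines, replace '    ' by '\t' in the rest (mutation is local)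
def pvProcessing (code : List String) : List String :=
  code.foldl (fun new_code c =>
    if ¬ (c = "\n") then new_code ++ [PySem.Str.replace c "    " "\t"] else new_code) []

def add_string_child (text_code : List String) : List String :=
  match text_code with
  | [] => []   -- unreachable under Pre_ (Python raises IndexError on [])
  | h :: t =>
    let st := t.foldl (fun (st : List String × String) line =>
      if ¬ (PySem.Str.isIn "    " line = true) then (st.1 ++ [st.2], line)
      else (st.1, st.2 ++ line)) ([], h)
    let new_code := if st.2 ∈ st.1 then st.1 else st.1 ++ [st.2]
    pvProcessing new_code

-- ===== PORT B =====
-- starts = [i for i, line in enumerate(text_code) if i == 0 or '    ' not in line]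
def pvStarts (text_code : List String) : List Int :=
  ((PySem.List.enumerate text_code 0).filter
    (fun p => p.1 == 0 || ¬ (PySem.Str.isIn "    " p.2 = true))).map (fun p => p.1)

-- bounds = starts + [len(text_code)]; groups = [''.join(text_code[a:b]) for a, b in zip(bounds, bounds[1:])]
def pvGroups (text_code : List String) : List String :=
  let bounds : List Int := pvStarts text_code ++ [(text_code.length : Int)]
  (bounds.zip bounds.tail).map
    (fun ab => PySem.Str.join "" (PySem.List.slice text_code (some ab.1) (some ab.2)))

def add_string_child_alt (text_code : List String) : List String :=
  let groups := pvGroups text_code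
  -- last = groups.pop()  (raises IndexError on an empty input — outside Pre_)
  let last := groups.getLastD ""
  let body := groups.dropLast
  let merged := if last ∈ body then body else body ++ [last]
  (merged.filter (fun s => ¬ (s = "\n"))).map (fun s => PySem.Str.replace s "    " "\t")

-- ===== PRECONDITION & SPEC =====
-- Pre_ excludes only the empty list: there A raises IndexError (text_code[0]),
-- and B raises IndexError too (groups.pop() on an empty list).
def Pre_add_string_child (text_code : List String) : Prop := text_code ≠ []
instance (text_code : List String) : Decidable (Pre_add_string_child text_code) := by
  unfold Pre_add_string_child; infer_instance
def pvWitness_add_string_child : List String := ["a\n", "    b\n"]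

def Spec_add_string_child (text_code : List String) (out : List String) : Prop := out = add_string_child_alt text_code
instance (text_code : List String) (out : List String) : Decidable (Spec_add_string_child text_code out) := by unfold Spec_add_string_child; infer_instance

-- ===== CLAIM (what is proved, stated in full; the proofs are below) =====
def Claim_equal_add_string_child : Prop := ∀ (text_code : List String), Dom_add_string_child text_code → Pre_add_string_child text_code → Spec_add_string_child text_code (add_string_child text_code)

-- ===== LEMMAS AND PROOFS =====

-- the merged groups, as a structural recursion (proof-only intermediate)
def pvMerge (cur : String) : List String → List String
  | [] => [cur]
  | line :: t =>
    if PySem.Str.isIn "    " line = true then pvMerge (cur ++ line) t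
    else cur :: pvMerge line t

theorem pvMerge_ne_nil (cur : String) (t : List String) : pvMerge cur t ≠ [] := by
  induction t generalizing cur with
  | nil => simp [pvMerge]
  | cons line t ih =>
    simp only [pvMerge]
    split
    · exact ih _
    · simp

-- A's loop computes (all groups but the last, last group)
theorem pvFoldlA (t : List String) : ∀ (acc : List String) (cur : String),
    t.foldl (fun (st : List String × String) line =>
      if ¬ (PySem.Str.isIn "    " line = true) then (st.1 ++ [st.2], line)
      else (st.1, st.2 ++ line)) (acc, cur)
    = (acc ++ (pvMerge cur t).dropLast, (pvMerge cur t).getLastD "") := by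
  induction t with
  | nil => intro acc cur; simp [pvMerge]
  | cons line t ih =>
    intro acc cur
    by_cases h : PySem.Str.isIn "    " line = true
    · rw [List.foldl_cons]
      rw [if_neg (by simpa using h)]
      rw [pvMerge, if_pos h]
      exact ih acc (cur ++ line)
    · rw [List.foldl_cons]
      rw [if_pos (by simpa using h)]
      rw [pvMerge, if_neg h]
      rw [ih (acc ++ [cur]) line]
      have hne := pvMerge_ne_nil line t
      rw [List.dropLast_cons_of_ne_nil hne, List.append_assoc]
      cases hm : pvMerge line t with
      | nil => exact absurd hm hne
      | cons a l => simp

-- ''.join of one string is that string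
theorem pvJoin_single (h : String) : PySem.Str.join "" [h] = h := by
  simp [PySem.Str.join, PySem.Chars.join_singleton]

-- ''.join merges adjacent pieces
theorem pvJoin_cons_cons (a b : String) (l : List String) :
    PySem.Str.join "" (a :: b :: l) = PySem.Str.join "" ((a ++ b) :: l) := by
  cases l with
  | nil =>
    simp [PySem.Str.join, PySem.Chars.join_cons_cons, PySem.Chars.join_singleton,
      String.ofList_append, String.ofList_toList]
  | cons c l =>
    simp [PySem.Str.join, PySem.Chars.join_cons_cons, String.ofList_append, String.ofList_toList]

-- ''.join peels its first piece off
theorem pvJoin_cons (a : String) (l : List String) :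
    PySem.Str.join "" (a :: l) = a ++ PySem.Str.join "" l := by
  induction l generalizing a with
  | nil => simp [PySem.Str.join]
  | cons b l ih =>
    rw [pvJoin_cons_cons, ih (a ++ b), ih b, String.append_assoc]

-- enumerate indices shift with the start
theorem pvEnumerate_shift {α : Type} (xs : List α) (s : Int) :
    PySem.List.enumerate xs (s + 1) = (PySem.List.enumerate xs s).map (fun p => (p.1 + 1, p.2)) := by
  induction xs generalizing s with
  | nil => simp [PySem.List.enumerate_nil]
  | cons x xs ih => simp [PySem.List.enumerate_cons, ih]

-- enumerate indices are at least the start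
theorem pvEnumerate_fst_le {α : Type} (xs : List α) (s : Int) :
    ∀ p ∈ PySem.List.enumerate xs s, s ≤ p.1 := by
  induction xs generalizing s with
  | nil => simp [PySem.List.enumerate_nil]
  | cons x xs ih =>
    intro p hp
    rw [PySem.List.enumerate_cons] at hp
    rcases List.mem_cons.mp hp with h | h
    · simp [h]
    · have := ih (s + 1) p h; omega

-- the unforced start positions (no i == 0 override), used to unfold pvStarts on a cons
def pvU (xs : List String) : List Int :=
  ((PySem.List.enumerate xs 0).filter
    (fun p => ¬ (PySem.Str.isIn "    " p.2 = true))).map (fun p => p.1)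

theorem pvU_nonneg (xs : List String) : ∀ c ∈ pvU xs, 0 ≤ c := by
  intro c hc
  unfold pvU at hc
  rcases List.mem_map.mp hc with ⟨p, hp, rfl⟩
  exact pvEnumerate_fst_le xs 0 p (List.mem_of_mem_filter hp)

theorem pvU_cons (y : String) (t : List String) :
    pvU (y :: t) = (if ¬ (PySem.Str.isIn "    " y = true) then [(0 : Int)] else [])
      ++ (pvU t).map (· + 1) := by
  unfold pvU
  rw [PySem.List.enumerate_cons, pvEnumerate_shift t 0, List.filter_cons, List.filter_map]
  by_cases h : PySem.Str.isIn "    " y = true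
  · rw [if_neg (by simpa using h), if_neg (by simpa using h)]
    simp [List.map_map, Function.comp_def]
  · rw [if_pos (by simpa using h), if_pos (by simpa using h)]
    simp [List.map_map, Function.comp_def]

theorem pvStarts_cons (x : String) (xs : List String) :
    pvStarts (x :: xs) = 0 :: (pvU xs).map (· + 1) := by
  unfold pvStarts
  rw [PySem.List.enumerate_cons, pvEnumerate_shift xs 0, List.filter_cons, List.filter_map]
  rw [if_pos (by simp)]
  have hcongr : (PySem.List.enumerate xs 0).filter
        ((fun (p : Int × String) => p.1 == 0 || ¬ (PySem.Str.isIn "    " p.2 = true)) ∘ (fun p => (p.1 + 1, p.2)))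
      = (PySem.List.enumerate xs 0).filter (fun p => ¬ (PySem.Str.isIn "    " p.2 = true)) := by
    apply List.filter_congr
    intro p hp
    have hnn : (0 : Int) ≤ p.1 := pvEnumerate_fst_le xs 0 p hp
    have : (p.1 + 1 == (0 : Int)) = false := by simp only [beq_eq_false_iff_ne]; omega
    simp [this]
  rw [hcongr]
  unfold pvU
  simp [List.map_map, Function.comp_def]

-- shifting both bounds by one over a consed list leaves the slice contents unchanged
theorem pvSlice_shift (x : String) (xs : List String) (a b : Int) (ha : 0 ≤ a) (hb : 0 ≤ b) :
    PySem.List.slice (x :: xs) (some (a + 1)) (some (b + 1)) = PySem.List.slice xs (some a) (some b) := by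
  rw [PySem.List.slice_toNat _ (by omega) (by omega), PySem.List.slice_toNat _ ha hb]
  have h1 : (a + 1).toNat = a.toNat + 1 := by omega
  have h2 : (b + 1).toNat = b.toNat + 1 := by omega
  rw [h1, h2]
  simp

theorem pvSlice_head (x : String) (xs : List String) (b : Int) (hb : 0 ≤ b) :
    PySem.List.slice (x :: xs) (some 0) (some (b + 1)) = x :: PySem.List.slice xs (some 0) (some b) := by
  rw [PySem.List.slice_toNat _ (by omega) (by omega), PySem.List.slice_toNat _ le_rfl hb]
  have h2 : (b + 1).toNat = b.toNat + 1 := by omega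
  simp [h2]

-- zip of shifted consecutive bounds over a consed list = zip of the bounds over the tail
theorem pvZipShift (x : String) (xs : List String) :
    ∀ (cs : List Int), (∀ c ∈ cs, 0 ≤ c) →
    (((cs.map (· + 1)).zip (cs.map (· + 1)).tail).map
      (fun ab => PySem.Str.join "" (PySem.List.slice (x :: xs) (some ab.1) (some ab.2))))
    = ((cs.zip cs.tail).map
      (fun ab => PySem.Str.join "" (PySem.List.slice xs (some ab.1) (some ab.2)))) := by
  intro cs
  induction cs with
  | nil => intro _; simp
  | cons a cs ih =>
    intro hnn
    cases cs with
    | nil => simp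
    | cons b cs =>
      have ha : (0:Int) ≤ a := hnn a (by simp)
      have hb : (0:Int) ≤ b := hnn b (by simp)
      simp only [List.map_cons, List.tail_cons, List.zip_cons_cons, List.map_cons]
      have := ih (fun c hc => hnn c (List.mem_cons_of_mem a hc))
      simp only [List.map_cons, List.tail_cons] at this
      rw [this, pvSlice_shift x xs a b ha hb]

-- one step of the bounds/zip/slice computation on a consed list
theorem pvBoundsStep (x : String) (zs : List String) (c0 : Int) (crest : List Int)
    (h0 : 0 ≤ c0) (hrest : ∀ c ∈ crest, 0 ≤ c) :
    ((0 :: (c0 :: crest).map (· + 1)).zip (0 :: (c0 :: crest).map (· + 1)).tail).map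
      (fun ab => PySem.Str.join "" (PySem.List.slice (x :: zs) (some ab.1) (some ab.2)))
    = PySem.Str.join "" (x :: PySem.List.slice zs (some 0) (some c0))
      :: ((c0 :: crest).zip (c0 :: crest).tail).map
          (fun ab => PySem.Str.join "" (PySem.List.slice zs (some ab.1) (some ab.2))) := by
  have hall : ∀ c ∈ c0 :: crest, 0 ≤ c :=
    fun c hc => (List.mem_cons.mp hc).elim (fun h => h ▸ h0) (hrest c)
  have hz := pvZipShift x zs (c0 :: crest) hall
  simp only [List.map_cons, List.tail_cons, List.zip_cons_cons, List.map_cons] at hz ⊢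
  rw [hz, pvSlice_head x zs c0 h0]

-- pvGroups on a cons with a nonempty tail: prepend the head to the first group or start a new one
theorem pvGroups_cons (x y : String) (t : List String) :
    pvGroups (x :: y :: t)
      = if PySem.Str.isIn "    " y = true
        then (pvGroups (y :: t)).modifyHead (x ++ ·)
        else x :: pvGroups (y :: t) := by
  have hnnU : ∀ c ∈ (pvU t).map (· + 1), 0 ≤ c := by
    intro c hc; rcases List.mem_map.mp hc with ⟨d, hd, rfl⟩
    have := pvU_nonneg t d hd; omega
  unfold pvGroups
  simp only [pvStarts_cons, pvU_cons, List.length_cons]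
  by_cases hy : PySem.Str.isIn "    " y = true
  · rw [if_pos hy, if_neg (by simpa using hy)]
    simp only [List.nil_append, List.cons_append]
    obtain ⟨c0, crest, hcs⟩ :
        ∃ c0 crest, (pvU t).map (· + 1) ++ [((t.length : Int) + 1)] = c0 :: crest :=
      List.exists_cons_of_ne_nil (by simp)
    have hlen2 : ((t.length + 1 + 1 : Nat) : Int) = ((t.length : Int) + 1) + 1 := by push_cast; ring
    have hlen1 : ((t.length + 1 : Nat) : Int) = (t.length : Int) + 1 := by push_cast; ring
    rw [hlen2, hlen1]
    have hmap : List.map (· + 1) ((pvU t).map (· + 1)) ++ [((t.length : Int) + 1) + 1]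
        = (c0 :: crest).map (· + 1) := by
      rw [← hcs, List.map_append]; simp
    rw [hmap, hcs]
    have h0 : (0:Int) ≤ c0 := by
      have : c0 ∈ c0 :: crest := by simp
      rw [← hcs] at this
      rcases List.mem_append.mp this with h | h
      · exact hnnU c0 h
      · simp at h; omega
    have hrest : ∀ c ∈ crest, 0 ≤ c := by
      intro c hc
      have : c ∈ c0 :: crest := by simp [hc]
      rw [← hcs] at this
      rcases List.mem_append.mp this with h | h
      · exact hnnU c h
      · simp at h; omega
    rw [pvBoundsStep x (y :: t) c0 crest h0 hrest]
    simp only [List.tail_cons, List.zip_cons_cons, List.map_cons, List.modifyHead_cons]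
    rw [pvJoin_cons]
  · rw [if_neg hy, if_pos (by simpa using hy)]
    simp only [List.cons_append, List.nil_append]
    have hlen2 : ((t.length + 1 + 1 : Nat) : Int) = ((t.length : Int) + 1) + 1 := by push_cast; ring
    have hlen1 : ((t.length + 1 : Nat) : Int) = (t.length : Int) + 1 := by push_cast; ring
    rw [hlen2, hlen1]
    have hmap : List.map (· + 1) ((0:Int) :: (pvU t).map (· + 1)) ++ [((t.length : Int) + 1) + 1]
        = ((0:Int) :: ((pvU t).map (· + 1) ++ [((t.length : Int) + 1)])).map (· + 1) := by
      simp
    rw [hmap]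
    have hrest : ∀ c ∈ (pvU t).map (· + 1) ++ [((t.length : Int) + 1)], 0 ≤ c := by
      intro c hc
      rcases List.mem_append.mp hc with h | h
      · exact hnnU c h
      · simp at h; omega
    rw [pvBoundsStep x (y :: t) 0 ((pvU t).map (· + 1) ++ [((t.length : Int) + 1)]) le_rfl hrest]
    have hsl : PySem.List.slice (y :: t) (some (0:Int)) (some (0:Int)) = [] := by
      rw [PySem.List.slice_toNat _ le_rfl le_rfl]; simp
    rw [hsl, pvJoin_single]

-- pvMerge prepends extra text onto its first group
theorem pvMerge_modifyHead (t : List String) : ∀ (h cur : String),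
    pvMerge (h ++ cur) t = (pvMerge cur t).modifyHead (h ++ ·) := by
  induction t with
  | nil => intro h cur; simp [pvMerge]
  | cons line t ih =>
    intro h cur
    by_cases hl : PySem.Str.isIn "    " line = true
    · rw [pvMerge, if_pos hl, pvMerge, if_pos hl, String.append_assoc, ih]
    · rw [pvMerge, if_neg hl, pvMerge, if_neg hl]
      simp

-- B's groups are exactly the merged groups
theorem pvGroups_eq_pvMerge (t : List String) : ∀ (h : String),
    pvGroups (h :: t) = pvMerge h t := by
  induction t with
  | nil =>
    intro h
    unfold pvGroups pvStarts
    simp [PySem.List.enumerate_cons, PySem.List.enumerate_nil, pvMerge,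
      PySem.List.slice_toNat, pvJoin_single]
  | cons y t ih =>
    intro h
    rw [pvGroups_cons]
    by_cases hy : PySem.Str.isIn "    " y = true
    · rw [if_pos hy, pvMerge, if_pos hy, ih y, pvMerge_modifyHead t h y]
    · rw [if_neg hy, pvMerge, if_neg hy, ih y]

-- processing_str_code's append loop is filter-then-map
theorem pvProcessing_eq (code : List String) :
    pvProcessing code
    = (code.filter (fun s => ¬ (s = "\n"))).map (fun s => PySem.Str.replace s "    " "\t") := by
  unfold pvProcessing
  induction code using List.reverseRecOn with
  | nil => simp
  | append_singleton l c ih =>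
    rw [List.foldl_append, List.filter_append, List.map_append, ih]
    by_cases h : c = "\n" <;> simp [h]

-- ===== VERDICT (by name: the statement is the Claim_ definition above) =====
theorem add_string_child_spec : Claim_equal_add_string_child := by
  intro text_code _ hpre
  unfold Spec_add_string_child
  match text_code with
  | [] => exact absurd rfl hpre
  | h :: t =>
    simp only [add_string_child, add_string_child_alt]
    rw [pvFoldlA t [] h, pvProcessing_eq, pvGroups_eq_pvMerge t h]
    simp
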